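-- pv_equiv track=rewrite | github.com/joanasteodoro/The-Playfair-Cipher | fp_projeto2.py | string_chave
-- ===== SOURCE A (Python) =====
-- def string_chave (c):
--     tabela_aux = ''
--     tabela = ''
--     for linha in c:
--         for letra in linha:
--             tabela_aux += letra + ' '
--     for car in range(len(tabela_aux)):
--         if (car + 1) % 10 == 0:
--             tabela += tabela_aux[car] + '\n'
--         else:
--             tabela += tabela_aux[car]
--     return tabela
-- ===== SOURCE B (Python) =====
-- def string_chave(c):
--     flat = ''.join(letra + ' ' for linha in c for letra in linha)
--     parts = []
--     for i in range(0, len(flat), 10):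
--         parts.append(flat[i:i + 10])
--         if i + 10 <= len(flat):
--             parts.append('\n')
--     return ''.join(parts)
-- ===== Notes on version B (the rewrite author's own statement) =====
-- stated objective: alternative
-- what changed: Replaces A's character-indexed second pass (appending one character at a time and testing (i+1)%10 on each) by a single join of the flattened letters followed by 10-character chunk slices with a newline after each full chunk.
import Mathlib
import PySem

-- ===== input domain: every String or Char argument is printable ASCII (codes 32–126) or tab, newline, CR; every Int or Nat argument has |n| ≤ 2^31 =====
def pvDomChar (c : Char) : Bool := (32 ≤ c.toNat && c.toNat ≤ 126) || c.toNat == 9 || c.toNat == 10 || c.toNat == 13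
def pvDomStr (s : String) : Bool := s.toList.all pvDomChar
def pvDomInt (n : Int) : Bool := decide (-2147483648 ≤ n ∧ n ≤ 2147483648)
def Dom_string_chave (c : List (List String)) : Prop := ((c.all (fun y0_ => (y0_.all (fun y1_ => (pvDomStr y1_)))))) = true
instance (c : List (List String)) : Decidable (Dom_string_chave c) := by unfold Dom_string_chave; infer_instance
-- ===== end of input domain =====

-- B replaces A's two passes (nested += loops, then a character-indexed loop testing (i+1)%10 on
-- every character) by one join of the flattened letters plus 10-character chunk slices; objective: simpler.

-- ===== PORT A =====
-- Strings are ported as their character lists (PySem.Chars representation); tabela_aux[car] is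
-- always in range here, so pyGet? is always `some` and the getD ' ' default is exact.
def string_chave (c : List (List String)) : String :=
  let tabela_aux : List Char :=
    c.foldl (fun acc linha => linha.foldl (fun a letra => a ++ (letra.toList ++ [' '])) acc) []
  let tabela : List Char :=
    (PySem.List.pyRange 0 (tabela_aux.length : Int)).foldl
      (fun tab car =>
        let ch := (PySem.List.pyGet? tabela_aux car).getD ' '
        if PySem.Int.mod (car + 1) 10 == 0 then tab ++ [ch, '\n'] else tab ++ [ch]) []
  String.ofList tabela

-- ===== PORT B =====
def string_chave_alt (c : List (List String)) : String :=
  let flat : List Char :=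
    PySem.Chars.join [] (c.flatMap (fun linha => linha.map (fun letra => letra.toList ++ [' '])))
  let parts : List (List Char) :=
    (PySem.List.pyRange 0 (flat.length : Int) 10).foldl
      (fun parts i =>
        let parts := parts ++ [PySem.List.slice flat (some i) (some (i + 10))]
        if i + 10 ≤ (flat.length : Int) then parts ++ [['\n']] else parts) []
  String.ofList (PySem.Chars.join [] parts)

-- ===== PRECONDITION & SPEC =====
def Spec_string_chave (c : List (List String)) (out : String) : Prop := out = string_chave_alt c
instance (c : List (List String)) (out : String) : Decidable (Spec_string_chave c out) := by unfold Spec_string_chave; infer_instance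

-- ===== CLAIM (what is proved, stated in full; the proofs are below) =====
def Claim_equal_string_chave : Prop := ∀ (c : List (List String)), Dom_string_chave c → Spec_string_chave c (string_chave c)

-- ===== LEMMAS AND PROOFS =====

theorem joinNil (l : List (List Char)) : PySem.Chars.join [] l = l.flatten := by
  induction l with
  | nil => simp [PySem.Chars.join, List.intercalate]
  | cons a r ih =>
    cases r with
    | nil => simp [PySem.Chars.join, List.intercalate, List.intersperse]
    | cons b r' => rw [PySem.Chars.join_cons_cons, ih]; simp

-- A's character loop, characterised as a recursion over the suffix with absolute position k.
def gA : List Char → Nat → List Char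
  | [], _ => []
  | ch :: t, k => ch :: (if (k + 1) % 10 = 0 then '\n' :: gA t (k + 1) else gA t (k + 1))

-- B's chunking, as a recursion on the flat character list.
def chunkB (s : List Char) : List Char :=
  if h : s = [] then []
  else s.take 10 ++ (if 10 ≤ s.length then ['\n'] else []) ++ chunkB (s.drop 10)
termination_by s.length
decreasing_by
  simp only [List.length_drop]
  have := List.length_pos_of_ne_nil h
  omega

-- B's chunking, generalised to a first chunk of r remaining characters.
def chunkAux : List Char → Nat → List Char
  | [], _ => []
  | ch :: t, r => if r = 1 then ch :: '\n' :: chunkAux t 10 else ch :: chunkAux t (r - 1)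

theorem pyRange_ten_cons {a b : Int} (h : a < b) :
    PySem.List.pyRange a b 10 = a :: PySem.List.pyRange (a + 10) b 10 := by
  rw [PySem.List.pyRange_of_pos a b (by norm_num), PySem.List.pyRange_of_pos (a + 10) b (by norm_num)]
  rw [if_pos h]
  by_cases h2 : a + 10 < b
  · rw [if_pos h2]
    have hc : ((b - a + 10 - 1) / 10).toNat = ((b - (a + 10) + 10 - 1) / 10).toNat + 1 := by omega
    rw [hc, List.range_succ_eq_map, List.map_cons, List.map_map]
    refine congrArg₂ _ (by ring) ?_
    apply List.map_congr_left
    intro x _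
    simp only [Function.comp_apply]
    push_cast
    ring
  · rw [if_neg h2]
    have hc : ((b - a + 10 - 1) / 10).toNat = 1 := by omega
    rw [hc]
    simp

theorem loopA_eq (aux : List Char) :
    ∀ (suf : List Char) (k : Nat) (tab : List Char), aux.drop k = suf →
      (PySem.List.pyRange (k : Int) (aux.length : Int)).foldl
        (fun tab car =>
          let ch := (PySem.List.pyGet? aux car).getD ' '
          if PySem.Int.mod (car + 1) 10 == 0 then tab ++ [ch, '\n'] else tab ++ [ch]) tab
      = tab ++ gA suf k := by
  intro suf
  induction suf with
  | nil =>
    intro k tab hdrop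
    have hk : aux.length ≤ k := List.drop_eq_nil_iff.mp hdrop
    rw [PySem.List.pyRange_one_eq_nil (by exact_mod_cast hk)]
    simp [gA]
  | cons ch t ih =>
    intro k tab hdrop
    have hk : k < aux.length := by
      by_contra hge
      rw [List.drop_eq_nil_of_le (by omega)] at hdrop
      simp at hdrop
    rw [PySem.List.pyRange_one_cons (by exact_mod_cast hk)]
    have hget : aux[k]? = some ch := by
      rw [← List.head?_drop, hdrop]; rfl
    have hcast : (k : Int) + 1 = ((k + 1 : Nat) : Int) := by push_cast; ring
    have hdrop' : aux.drop (k + 1) = t := by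
      rw [← List.tail_drop, hdrop, List.tail_cons]
    simp only [List.foldl_cons, PySem.List.pyGet?_natCast, hget, Option.getD_some, hcast]
    rw [ih (k + 1) _ hdrop']
    by_cases hmod : (k + 1) % 10 = 0
    · have hdvd : (10 : Int) ∣ (k : Int) + 1 := by omega
      simp [hdvd, hmod, gA]
    · have hdvd : ¬ (10 : Int) ∣ (k : Int) + 1 := by omega
      simp [hdvd, hmod, gA]

theorem g_chunkAux : ∀ (t : List Char) (k : Nat), chunkAux t (10 - k % 10) = gA t k := by
  intro t
  induction t with
  | nil => intro k; simp [chunkAux, gA]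
  | cons ch t ih =>
    intro k
    by_cases h : k % 10 = 9
    · have h1 : 10 - k % 10 = 1 := by omega
      have h2 : (k + 1) % 10 = 0 := by omega
      have h3 : 10 - (k + 1) % 10 = 10 := by omega
      simp only [gA, chunkAux, h1, h2]
      rw [← h3, ih]
      simp
    · have h1 : 10 - k % 10 ≠ 1 := by omega
      have h2 : (k + 1) % 10 ≠ 0 := by omega
      have h3 : 10 - k % 10 - 1 = 10 - (k + 1) % 10 := by omega
      simp only [gA, chunkAux, if_neg h1, if_neg h2, h3, ih]

theorem chunkAux_unroll :
    ∀ (s : List Char) (r : Nat), 1 ≤ r →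
      chunkAux s r = s.take r ++ (if r ≤ s.length then '\n' :: chunkAux (s.drop r) 10 else []) := by
  intro s
  induction s with
  | nil => intro r hr; simp [chunkAux]; omega
  | cons ch t ih =>
    intro r hr
    match r, hr with
    | 1, _ => simp [chunkAux]
    | (r' + 2), _ =>
      have : ¬ (r' + 2 = 1) := by omega
      simp only [chunkAux, if_neg this, List.take_succ_cons, List.drop_succ_cons,
        List.length_cons]
      rw [show r' + 2 - 1 = r' + 1 from rfl, ih (r' + 1) (by omega)]
      have hiff : r' + 2 ≤ t.length + 1 ↔ r' + 1 ≤ t.length := by omega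
      by_cases hle : r' + 1 ≤ t.length
      · simp [hle, hiff.mpr hle]
      · simp [hle, hiff]

theorem chunkB_eq : ∀ s : List Char, chunkB s = chunkAux s 10 := by
  intro s
  induction s using chunkB.induct with
  | case1 => rw [chunkB]; simp [chunkAux]
  | case2 s h ih =>
    rw [chunkB, chunkAux_unroll s 10 (by norm_num)]
    by_cases h10 : 10 ≤ s.length
    · simp [h, h10, ih]
    · have hdrop : s.drop 10 = [] := List.drop_eq_nil_of_le (by omega)
      have hnil : chunkB [] = [] := by rw [chunkB]; simp
      simp [h, h10, hdrop, hnil]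

theorem loopB_eq (flat : List Char) :
    ∀ (suf : List Char) (k : Nat) (parts : List (List Char)), flat.drop k = suf →
      PySem.Chars.join []
        ((PySem.List.pyRange (k : Int) (flat.length : Int) 10).foldl
          (fun parts i =>
            let parts := parts ++ [PySem.List.slice flat (some i) (some (i + 10))]
            if i + 10 ≤ (flat.length : Int) then parts ++ [['\n']] else parts) parts)
      = PySem.Chars.join [] parts ++ chunkB suf := by
  intro suf
  induction suf using chunkB.induct with
  | case1 =>
    intro k parts hdrop
    have hk : flat.length ≤ k := List.drop_eq_nil_iff.mp hdrop
    rw [PySem.List.pyRange_of_pos _ _ (by norm_num : (0 : Int) < 10),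
      if_neg (show ¬ (k : Int) < (flat.length : Int) from by exact_mod_cast Nat.not_lt.mpr hk)]
    have hnil : chunkB [] = [] := by rw [chunkB]; simp
    simp [hnil]
  | case2 s hne ih =>
    intro k parts hdrop
    have hk : k < flat.length := by
      by_contra hge
      rw [List.drop_eq_nil_of_le (by omega)] at hdrop
      exact hne hdrop.symm
    rw [pyRange_ten_cons (by exact_mod_cast hk)]
    have hcast : (k : Int) + 10 = ((k + 10 : Nat) : Int) := by push_cast; ring
    have hslice : PySem.List.slice flat (some (k : Int)) (some ((k : Int) + 10)) = s.take 10 := by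
      rw [hcast, PySem.List.slice_natCast, show k + 10 - k = 10 from by omega, hdrop]
    have hlen : s.length = flat.length - k := by rw [← hdrop, List.length_drop]
    have hdrop10 : flat.drop (k + 10) = s.drop 10 := by
      rw [← hdrop, List.drop_drop, Nat.add_comm]
    have hnff : chunkB s = s.take 10 ++ (if 10 ≤ s.length then ['\n'] else []) ++ chunkB (s.drop 10) := by
      rw [chunkB]; simp [hne]
    simp only [List.foldl_cons, hslice]
    by_cases h10 : 10 ≤ s.length
    · have hcond : (k : Int) + 10 ≤ (flat.length : Int) := by
        have : k + 10 ≤ flat.length := by omega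
        exact_mod_cast this
      rw [if_pos hcond, hcast, ih (k + 10) _ hdrop10, hnff, if_pos h10]
      simp [joinNil, List.append_assoc]
    · have hcond : ¬ (k : Int) + 10 ≤ (flat.length : Int) := by
        have : ¬ k + 10 ≤ flat.length := by omega
        exact_mod_cast fun hle => this (by exact_mod_cast hle)
      rw [if_neg hcond, hcast, ih (k + 10) _ hdrop10, hnff, if_neg h10]
      simp [joinNil, List.append_assoc]

theorem flatten_map_flatten {α β : Type} (f : β → List (List α)) (c : List β) :
    (c.map (fun x => (f x).flatten)).flatten = (c.map f).flatten.flatten := by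
  induction c with
  | nil => rfl
  | cons a r ih => simp [ih]

theorem flat_eq (c : List (List String)) :
    c.foldl (fun acc linha => linha.foldl (fun a letra => a ++ (letra.toList ++ [' '])) acc) []
      = PySem.Chars.join []
          (c.flatMap (fun linha => linha.map (fun letra => letra.toList ++ [' ']))) := by
  rw [joinNil]
  simp only [PySem.List.foldl_append_eq_flatMap, List.nil_append, List.flatMap_def]
  exact flatten_map_flatten (fun linha => List.map (fun letra => letra.toList ++ [' ']) linha) c

-- ===== VERDICT (by name: the statement is the Claim_ definition above) =====
theorem string_chave_spec : Claim_equal_string_chave := by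
  intro c _
  show string_chave c = string_chave_alt c
  unfold string_chave string_chave_alt
  rw [← flat_eq c]
  apply congrArg String.ofList
  have HA := loopA_eq
    (c.foldl (fun acc linha => linha.foldl (fun a letra => a ++ (letra.toList ++ [' '])) acc) [])
    (c.foldl (fun acc linha => linha.foldl (fun a letra => a ++ (letra.toList ++ [' '])) acc) [])
    0 [] rfl
  have HB := loopB_eq
    (c.foldl (fun acc linha => linha.foldl (fun a letra => a ++ (letra.toList ++ [' '])) acc) [])
    (c.foldl (fun acc linha => linha.foldl (fun a letra => a ++ (letra.toList ++ [' '])) acc) [])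
    0 [] rfl
  rw [Nat.cast_zero] at HA HB
  rw [HA, HB, chunkB_eq, ← g_chunkAux _ 0]
  simp
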